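-- pv_equiv track=rewrite | github.com/Pirgosth/advent-of-code-2024 | Day 2/lib/algo.py | is_level_safe
-- ===== SOURCE A (Python) =====
-- def compute_distance(a: int, b: int) -> int:
--     return abs(b - a)
--
-- def is_distance_safe(distance: int) -> bool:
--     return 1 <= distance and distance <= 3
--
-- def is_level_safe(level: list[int], dampener: bool = False, deep = False) -> bool:
--     if len(level) <= 1:
--         return True
--
--     if not is_distance_safe(compute_distance(level[0], level[1])):
--         if not dampener or deep:
--             return False
--         return is_level_safe([level[0]] + level[2:], True, True) or is_level_safe(level[:0] + level[1:], True, True)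
--
--     direction = 1 if level[0] <= level[1] else -1
--     for i in range(1, len(level) -1):
--         local_direction = 1 if level[i] <= level[i+1] else -1
--         if direction != local_direction or not is_distance_safe(compute_distance(level[i], level[i+1])):
--             if not dampener:
--                 return False
--             elif dampener:
--                 return not deep and (is_level_safe(level[:i-1] + level[i:], True, True) or is_level_safe(level[:i] + level[i+1:], True, True) or (is_level_safe(level[:i+1] + level[i+2:], True, True)))
--
--     return True
-- ===== SOURCE B (Python) =====
-- def is_level_safe(level: list[int], dampener: bool = False, deep = False) -> bool:
--     def diffs(l):
--         return (b - a for a, b in zip(l, l[1:]))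
--     def safe(l):
--         return (all(1 <= abs(d) <= 3 for d in diffs(l))
--                 and (all(d > 0 for d in diffs(l)) or all(d < 0 for d in diffs(l))))
--     if safe(level):
--         return True
--     if not dampener or deep:
--         return False
--     return any(safe(level[:i] + level[i + 1:]) for i in range(len(level)))
-- ===== Notes on version B (the rewrite author's own statement) =====
-- stated objective: idiomatic
-- what changed: B replaces A's single-pass recursion that repairs only around the first violation (retrying removal of indices i-1, i, i+1) by the standard AoC solution: a safe() check on the list of adjacent differences plus an explicit try-removing-every-index scan.
import Mathlib
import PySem

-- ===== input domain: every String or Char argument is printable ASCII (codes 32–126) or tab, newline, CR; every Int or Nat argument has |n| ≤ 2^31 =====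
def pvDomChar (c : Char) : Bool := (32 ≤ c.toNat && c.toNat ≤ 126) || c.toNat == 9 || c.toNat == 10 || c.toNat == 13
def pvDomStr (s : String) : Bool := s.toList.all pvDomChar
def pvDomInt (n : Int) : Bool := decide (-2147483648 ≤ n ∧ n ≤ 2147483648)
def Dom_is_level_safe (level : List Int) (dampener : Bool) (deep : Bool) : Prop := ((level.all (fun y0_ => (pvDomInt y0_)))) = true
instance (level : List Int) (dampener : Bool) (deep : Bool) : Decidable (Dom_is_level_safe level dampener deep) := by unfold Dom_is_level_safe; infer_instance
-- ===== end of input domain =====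

-- B replaces A's single-pass local-repair recursion by a plain safety check on the
-- list of adjacent differences plus an explicit try-every-single-removal scan
-- (objective: simpler / idiomatic; no speed claim).

-- ===== PORT A =====
-- A's module helpers
def compute_distance (a : Int) (b : Int) : Int := |b - a|

def is_distance_safe (distance : Int) : Bool := decide (1 ≤ distance) && decide (distance ≤ 3)

-- Python indexes level[i] with i provably in range (0 ≤ i < len), so List.getD is exact;
-- slices have nonnegative bounds, so take/drop (which clamp exactly like Python) are exact.
mutual
-- the for-loop 'for i in range(1, len(level)-1)': loop variable i = j + 1
def is_level_safe_go (level : List Int) (dampener : Bool) (deep : Bool) (direction : Int) (j : Nat) : Bool :=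
  if h : j + 1 < level.length - 1 then
    let i := j + 1
    let local_direction : Int := if level.getD i 0 ≤ level.getD (i+1) 0 then 1 else -1
    if decide (direction ≠ local_direction) || !(is_distance_safe (compute_distance (level.getD i 0) (level.getD (i+1) 0))) then
      if !dampener then false
      else !deep && (is_level_safe (level.take (i-1) ++ level.drop i) true true
                  || is_level_safe (level.take i ++ level.drop (i+1)) true true
                  || is_level_safe (level.take (i+1) ++ level.drop (i+2)) true true)
    else
      is_level_safe_go level dampener deep direction (j+1)
  else true
termination_by (level.length, level.length - j)
decreasing_by
  · left; simp [List.length_take, List.length_drop]; omega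
  · left; simp [List.length_take, List.length_drop]; omega
  · left; simp [List.length_take, List.length_drop]; omega
  · right; omega

def is_level_safe (level : List Int) (dampener : Bool) (deep : Bool) : Bool :=
  if h : level.length ≤ 1 then true
  else if !(is_distance_safe (compute_distance (level.getD 0 0) (level.getD 1 0))) then
    if !dampener || deep then false
    else is_level_safe ([level.getD 0 0] ++ level.drop 2) true true
      || is_level_safe (level.take 0 ++ level.drop 1) true true
  else
    let direction : Int := if level.getD 0 0 ≤ level.getD 1 0 then 1 else -1
    is_level_safe_go level dampener deep direction 0
termination_by (level.length, level.length + 1)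
decreasing_by
  · left; simp; omega
  · left; simp; omega
  · right; omega
end

-- ===== PORT B =====
-- [b - a for a, b in zip(l, l[1:])]
def altDiffs (l : List Int) : List Int := List.zipWith (fun a b => b - a) l (l.drop 1)

-- safe(l) of Source B
def altSafe (l : List Int) : Bool :=
  (altDiffs l).all (fun d => decide (1 ≤ |d|) && decide (|d| ≤ 3))
  && ((altDiffs l).all (fun d => decide (0 < d)) || (altDiffs l).all (fun d => decide (d < 0)))

def is_level_safe_alt (level : List Int) (dampener : Bool) (deep : Bool) : Bool :=
  if altSafe level then true
  else if !dampener || deep then false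
  else (List.range level.length).any (fun i => altSafe (level.take i ++ level.drop (i+1)))

-- ===== PRECONDITION & SPEC =====
def Spec_is_level_safe (level : List Int) (dampener : Bool) (deep : Bool) (out : Bool) : Prop := out = is_level_safe_alt level dampener deep
instance (level : List Int) (dampener : Bool) (deep : Bool) (out : Bool) : Decidable (Spec_is_level_safe level dampener deep out) := by unfold Spec_is_level_safe; infer_instance

-- ===== CLAIM (what is proved, stated in full; the proofs are below) =====
def Claim_equal_is_level_safe : Prop := ∀ (level : List Int) (dampener : Bool) (deep : Bool), Dom_is_level_safe level dampener deep → Spec_is_level_safe level dampener deep (is_level_safe level dampener deep)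

-- ===== LEMMAS AND PROOFS =====

-- the k-th adjacent difference
def pdiff (l : List Int) (k : Nat) : Int := l.getD (k+1) 0 - l.getD k 0
-- the per-difference distance check
def distOK (x : Int) : Prop := 1 ≤ |x| ∧ |x| ≤ 3
-- A's local direction at index k
def ldir (l : List Int) (k : Nat) : Int := if l.getD k 0 ≤ l.getD (k+1) 0 then 1 else -1
-- pair k is safe and agrees with direction dir
def Good (l : List Int) (dir : Int) (k : Nat) : Prop := distOK (pdiff l k) ∧ ldir l k = dir

theorem length_altDiffs (l : List Int) : (altDiffs l).length = l.length - 1 := by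
  simp [altDiffs]

theorem getElem_altDiffs (l : List Int) (k : Nat) (h : k < (altDiffs l).length) :
    (altDiffs l)[k] = pdiff l k := by
  have hl : k + 1 < l.length := by have := length_altDiffs l; omega
  simp [altDiffs, pdiff, List.getElem_zipWith, List.getD_eq_getElem?_getD, List.getElem?_eq_getElem hl,
    List.getElem?_eq_getElem (by omega : k < l.length)]

theorem mem_altDiffs (l : List Int) (k : Nat) (h : k + 1 < l.length) :
    pdiff l k ∈ altDiffs l := by
  have hk : k < (altDiffs l).length := by rw [length_altDiffs]; omega
  rw [← getElem_altDiffs l k hk]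
  exact List.getElem_mem hk

theorem altDiffs_cons_cons (a b : Int) (t : List Int) :
    altDiffs (a :: b :: t) = (b - a) :: altDiffs (b :: t) := by
  simp [altDiffs]

theorem mem_altDiffs_pair (x y : Int) (s : List Int) :
    ∀ p : List Int, (y - x) ∈ altDiffs (p ++ x :: y :: s) := by
  intro p
  induction p with
  | nil => rw [List.nil_append, altDiffs_cons_cons]; exact List.mem_cons_self ..
  | cons a p ih =>
    cases hm : p ++ x :: y :: s with
    | nil => exact absurd hm (by simp)
    | cons b t =>
      rw [List.cons_append, hm, altDiffs_cons_cons]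
      exact List.mem_cons_of_mem _ (hm ▸ ih)

theorem altSafe_distOK {l : List Int} {x : Int} (hs : altSafe l = true) (hx : x ∈ altDiffs l) :
    distOK x := by
  unfold altSafe at hs
  have h1 := (Bool.and_eq_true ..).mp hs |>.1
  rw [List.all_eq_true] at h1
  have := h1 x hx
  simp at this
  simpa [distOK] using this

theorem altSafe_sign {l : List Int} {x y : Int} (hs : altSafe l = true)
    (hx : x ∈ altDiffs l) (hy : y ∈ altDiffs l) : 0 < x ↔ 0 < y := by
  unfold altSafe at hs
  have h2 := (Bool.and_eq_true ..).mp hs |>.2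
  rcases Bool.or_eq_true .. |>.mp h2 with h | h <;> rw [List.all_eq_true] at h
  · have hx' := h x hx; have hy' := h y hy; simp at hx' hy'; omega
  · have hx' := h x hx; have hy' := h y hy; simp at hx' hy'; omega

theorem distOK_ne {x : Int} (h : distOK x) : x ≠ 0 := by
  obtain ⟨h1, -⟩ := h
  rw [Int.abs_eq_natAbs] at h1; omega

theorem ldir_eq (l : List Int) (k : Nat) (h : pdiff l k ≠ 0) :
    ldir l k = if 0 < pdiff l k then 1 else -1 := by
  simp only [ldir, pdiff] at h ⊢; split_ifs <;> omega

theorem altSafe_eq_true_iff (l : List Int) :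
    altSafe l = true ↔ ∀ k, k + 1 < l.length → Good l (ldir l 0) k := by
  constructor
  · intro hs k hk
    have hlen2 : 1 < l.length := by omega
    have hmk := mem_altDiffs l k hk
    have hm0 := mem_altDiffs l 0 hlen2
    have hdk := altSafe_distOK hs hmk
    have hd0 := altSafe_distOK hs hm0
    refine ⟨hdk, ?_⟩
    have hsg := altSafe_sign hs hmk hm0
    rw [ldir_eq l k (distOK_ne hdk), ldir_eq l 0 (distOK_ne hd0)]
    simp only [hsg]
  · intro h
    rcases Nat.lt_or_ge l.length 2 with hl | hl
    · have : altDiffs l = [] := List.eq_nil_of_length_eq_zero (by rw [length_altDiffs]; omega)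
      simp [altSafe, this]
    · have hl : 1 < l.length := hl
      have hd0 : distOK (pdiff l 0) := (h 0 hl).1
      have key : ∀ x ∈ altDiffs l, ∃ k, k + 1 < l.length ∧ x = pdiff l k := by
        intro x hx
        rcases List.mem_iff_getElem.mp hx with ⟨k, hk, rfl⟩
        exact ⟨k, by have := length_altDiffs l; omega, getElem_altDiffs l k hk⟩
      unfold altSafe
      rw [Bool.and_eq_true]
      constructor
      · rw [List.all_eq_true]
        intro x hx
        rcases key x hx with ⟨k, hk, rfl⟩
        have := (h k hk).1
        simp [distOK] at this ⊢; omega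
      · rcases Int.lt_or_lt_of_ne (distOK_ne hd0) with hneg | hpos
        · rw [Bool.or_eq_true]; right
          rw [List.all_eq_true]
          intro x hx
          rcases key x hx with ⟨k, hk, rfl⟩
          obtain ⟨hdk, hld⟩ := h k hk
          rw [ldir_eq l k (distOK_ne hdk), ldir_eq l 0 (distOK_ne hd0)] at hld
          simp only [if_neg (by omega : ¬ (0:Int) < pdiff l 0)] at hld
          by_cases hp : 0 < pdiff l k
          · rw [if_pos hp] at hld; omega
          · have := distOK_ne hdk; simp; omega
        · rw [Bool.or_eq_true]; left
          rw [List.all_eq_true]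
          intro x hx
          rcases key x hx with ⟨k, hk, rfl⟩
          obtain ⟨hdk, hld⟩ := h k hk
          rw [ldir_eq l k (distOK_ne hdk), ldir_eq l 0 (distOK_ne hd0)] at hld
          simp only [if_pos hpos] at hld
          by_cases hp : 0 < pdiff l k
          · simpa using hp
          · rw [if_neg hp] at hld; omega

theorem altSafe_short {l : List Int} (h : l.length ≤ 1) : altSafe l = true := by
  have : altDiffs l = [] := List.eq_nil_of_length_eq_zero (by rw [length_altDiffs]; omega)
  simp [altSafe, this]

-- splitting l around an index triple
theorem split3 (l : List Int) (i : Nat) (h1 : 1 ≤ i) (hi : i + 1 < l.length) :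
    l = l.take (i-1) ++ l.getD (i-1) 0 :: l.getD i 0 :: l.getD (i+1) 0 :: l.drop (i+2) := by
  have e1 : l.drop (i-1) = l.getD (i-1) 0 :: l.drop i := by
    rw [List.drop_eq_getElem_cons (by omega : i - 1 < l.length), List.getD_eq_getElem l 0 (by omega)]
    congr 2; omega
  have e2 : l.drop i = l.getD i 0 :: l.drop (i+1) := by
    rw [List.drop_eq_getElem_cons (by omega), List.getD_eq_getElem l 0 (by omega)]
  have e3 : l.drop (i+1) = l.getD (i+1) 0 :: l.drop (i+2) := by
    rw [List.drop_eq_getElem_cons (by omega), List.getD_eq_getElem l 0 (by omega)]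
  conv_lhs => rw [← List.take_append_drop (i-1) l]
  rw [e1, e2, e3]

theorem decomp_triple (l : List Int) (i j : Nat) (h1 : 1 ≤ i) (hi : i + 1 < l.length)
    (hj : j < l.length) (hcase : j + 2 ≤ i ∨ i + 2 ≤ j) :
    ∃ p s, l.take j ++ l.drop (j+1) =
      p ++ l.getD (i-1) 0 :: l.getD i 0 :: l.getD (i+1) 0 :: s := by
  have hsp := split3 l i h1 hi
  set x := l.getD (i-1) 0 with hx
  set y := l.getD i 0 with hy
  set z := l.getD (i+1) 0 with hz
  set P := l.take (i-1) with hP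
  have hPlen : P.length = i - 1 := by rw [hP, List.length_take]; omega
  rcases hcase with hc | hc
  · -- j well before i : the triple survives in the dropped tail
    refine ⟨l.take j ++ P.drop (j+1), l.drop (i+2), ?_⟩
    have ht : l.take j = P.take j := by
      rw [hP, List.take_take]; congr 1; omega
    have hd : l.drop (j+1) = P.drop (j+1) ++ x :: y :: z :: l.drop (i+2) := by
      conv_lhs => rw [hsp]
      rw [List.drop_append]
      congr 1
      have : j + 1 - P.length = 0 := by omega
      rw [this, List.drop_zero]
    rw [hd, ht, List.append_assoc]
  · -- j well after i : the triple survives in the kept prefix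
    refine ⟨P, (l.drop (i+2)).take (j - (i+2)) ++ l.drop (j+1), ?_⟩
    have hQ : l.take j = P ++ x :: y :: z :: (l.drop (i+2)).take (j - (i+2)) := by
      conv_lhs => rw [hsp]
      rw [List.take_append]
      rw [show P.length = i - 1 from hPlen]
      rw [List.take_of_length_le (by rw [hPlen]; omega)]
      congr 1
      rw [show x :: y :: z :: l.drop (i+2) = [x,y,z] ++ l.drop (i+2) from rfl,
        List.take_append, List.take_of_length_le (by simp; omega)]
      simp
      omega
    rw [hQ]
    simp [List.append_assoc]

theorem decomp_pair (l : List Int) (j : Nat) (h2 : 2 ≤ l.length) (hj : 2 ≤ j) :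
    ∃ s, l.take j ++ l.drop (j+1) = l.getD 0 0 :: l.getD 1 0 :: s := by
  match l, h2 with
  | a :: b :: t, _ =>
    obtain ⟨m, rfl⟩ : ∃ m, j = m + 2 := ⟨j - 2, by omega⟩
    exact ⟨t.take m ++ (a :: b :: t).drop (m + 3), by simp [List.getD]⟩

-- removing an index far from the (first) violation cannot help
theorem rm_unsafe (l : List Int) (dir : Int) (i j : Nat)
    (hdir : dir = ldir l 0) (hd0 : distOK (pdiff l 0))
    (h1 : 1 ≤ i) (hi : i + 1 < l.length)
    (hprev : ∀ k, 1 ≤ k → k < i → Good l dir k) (hbad : ¬ Good l dir i)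
    (hj : j < l.length) (hcase : j + 2 ≤ i ∨ i + 2 ≤ j) :
    altSafe (l.take j ++ l.drop (j+1)) = false := by
  by_contra hne
  have hs : altSafe (l.take j ++ l.drop (j+1)) = true := by
    cases hcs : altSafe (l.take j ++ l.drop (j+1))
    · exact absurd hcs hne
    · rfl
  rcases decomp_triple l i j h1 hi hj hcase with ⟨p, s, hds⟩
  rw [hds] at hs
  set x := l.getD (i-1) 0 with hxd
  set y := l.getD i 0 with hyd
  set z := l.getD (i+1) 0 with hzd
  have hmem1 : (y - x) ∈ altDiffs (p ++ x :: y :: z :: s) := mem_altDiffs_pair x y (z :: s) p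
  have hmem2 : (z - y) ∈ altDiffs (p ++ x :: y :: z :: s) := by
    have e : p ++ x :: y :: z :: s = (p ++ [x]) ++ y :: z :: s := by simp
    rw [e]; exact mem_altDiffs_pair y z s (p ++ [x])
  have hdzy : distOK (z - y) := altSafe_distOK hs hmem2
  have hsgn : (0 < y - x ↔ 0 < z - y) := altSafe_sign hs hmem1 hmem2
  have hpi : pdiff l i = z - y := rfl
  have hpim : pdiff l (i-1) = y - x := by
    simp only [pdiff]
    rw [show i - 1 + 1 = i by omega]
  have hgim : distOK (pdiff l (i-1)) ∧ ldir l (i-1) = dir := by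
    rcases Nat.eq_or_lt_of_le h1 with he | hlt
    · rw [← he]; exact ⟨hd0, hdir.symm⟩
    · exact hprev (i-1) (by omega) (by omega)
  apply hbad
  refine ⟨by rw [hpi]; exact hdzy, ?_⟩
  have hdir' : dir = if 0 < pdiff l (i-1) then 1 else -1 := by
    rw [← hgim.2, ldir_eq l (i-1) (distOK_ne hgim.1)]
  rw [hpim] at hdir'
  rw [ldir_eq l i (by rw [hpi]; exact distOK_ne hdzy), hpi, hdir']
  by_cases hzy : 0 < z - y
  · rw [if_pos hzy, if_pos (hsgn.mpr hzy)]
  · rw [if_neg hzy, if_neg (fun h => hzy (hsgn.mp h))]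

theorem rm_unsafe0 (l : List Int) (j : Nat) (h2 : 2 ≤ l.length)
    (hbad : ¬ distOK (pdiff l 0)) (hj : 2 ≤ j) :
    altSafe (l.take j ++ l.drop (j+1)) = false := by
  by_contra hne
  have hs : altSafe (l.take j ++ l.drop (j+1)) = true := by
    cases hcs : altSafe (l.take j ++ l.drop (j+1))
    · exact absurd hcs hne
    · rfl
  obtain ⟨s, hds⟩ := decomp_pair l j h2 hj
  rw [hds] at hs
  have hmem : (l.getD 1 0 - l.getD 0 0) ∈ altDiffs (l.getD 0 0 :: l.getD 1 0 :: s) := by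
    have := mem_altDiffs_pair (l.getD 0 0) (l.getD 1 0) s []
    simpa using this
  exact hbad (altSafe_distOK hs hmem)

theorem dist_bool (a b : Int) :
    is_distance_safe (compute_distance a b) = true ↔ distOK (b - a) := by
  unfold is_distance_safe compute_distance distOK
  simp

theorem cond_false_iff (l : List Int) (dir : Int) (j : Nat) :
    ((decide (dir ≠ (if l.getD j 0 ≤ l.getD (j+1) 0 then (1:Int) else -1))
      || !(is_distance_safe (compute_distance (l.getD j 0) (l.getD (j+1) 0)))) = false)
      ↔ Good l dir j := by
  constructor
  · intro h
    rw [Bool.or_eq_false_iff] at h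
    obtain ⟨h1, h2⟩ := h
    have hdireq : dir = (if l.getD j 0 ≤ l.getD (j+1) 0 then (1:Int) else -1) := by
      simpa using h1
    have hds : is_distance_safe (compute_distance (l.getD j 0) (l.getD (j+1) 0)) = true := by
      simpa using h2
    exact ⟨(dist_bool _ _).mp hds, hdireq.symm⟩
  · rintro ⟨hd, hl⟩
    rw [Bool.or_eq_false_iff]
    refine ⟨by simpa using (show dir = _ from hl.symm), ?_⟩
    have hds := (dist_bool (l.getD j 0) (l.getD (j+1) 0)).mpr hd
    rw [Bool.not_eq_false']
    exact hds

-- no pair through position i can be safe if pair i violates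
theorem altSafe_false_of_bad (l : List Int) (dir : Int) (i : Nat)
    (hdir : dir = ldir l 0) (hi : i + 1 < l.length) (hbad : ¬ Good l dir i) :
    altSafe l = false := by
  cases hAS : altSafe l
  · rfl
  · exact absurd (by rw [hdir]; exact (altSafe_eq_true_iff l).mp hAS i hi) hbad

theorem go_terminal (l : List Int) (dir : Int)
    (hd0 : distOK (pdiff l 0)) (hdir : dir = ldir l 0) (j : Nat)
    (hng : l.length ≤ j + 2) (hinv : ∀ k, 1 ≤ k → k ≤ j → Good l dir k) :
    altSafe l = true := by
  rw [altSafe_eq_true_iff]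
  intro k hk
  rcases Nat.eq_zero_or_pos k with rfl | hkpos
  · exact ⟨hd0, rfl⟩
  · have hg := hinv k hkpos (by omega)
    rw [← hdir]; exact hg

-- the loop when retries are disabled (dampener false, or deep)
theorem go_plain (l : List Int) (damp deep : Bool) (dir : Int)
    (hdd : damp = false ∨ deep = true)
    (hd0 : distOK (pdiff l 0)) (hdir : dir = ldir l 0) (hlen : 2 ≤ l.length) :
    ∀ j, (∀ k, 1 ≤ k → k ≤ j → Good l dir k) →
      is_level_safe_go l damp deep dir j = altSafe l := by
  suffices H : ∀ m j, l.length - (j+2) ≤ m → (∀ k, 1 ≤ k → k ≤ j → Good l dir k) →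
      is_level_safe_go l damp deep dir j = altSafe l from
    fun j hinv => H (l.length - (j+2)) j le_rfl hinv
  intro m
  induction m with
  | zero =>
    intro j hle hinv
    rw [is_level_safe_go, dif_neg (by omega)]
    exact (go_terminal l dir hd0 hdir j (by omega) hinv).symm
  | succ m ih =>
    intro j hle hinv
    rw [is_level_safe_go]
    by_cases hguard : j + 1 < l.length - 1
    · rw [dif_pos hguard]
      by_cases hgood : Good l dir (j+1)
      · rw [if_neg (by simp only [Bool.not_eq_true]; exact (cond_false_iff l dir (j+1)).mpr hgood)]
        exact ih (j+1) (by omega) (fun k hk1 hk2 => by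
          rcases Nat.lt_or_ge k (j+1) with h | h
          · exact hinv k hk1 (by omega)
          · have : k = j + 1 := by omega
            exact this ▸ hgood)
      · rw [if_pos (by
          cases hc : (decide (dir ≠ (if l.getD (j+1) 0 ≤ l.getD (j+1+1) 0 then (1:Int) else -1))
            || !(is_distance_safe (compute_distance (l.getD (j+1) 0) (l.getD (j+1+1) 0))))
          · exact absurd ((cond_false_iff l dir (j+1)).mp hc) hgood
          · rfl)]
        have hAS : altSafe l = false :=
          altSafe_false_of_bad l dir (j+1) hdir (by omega) hgood
        rcases hdd with hd | hd
        · rw [hd]; simp [hAS]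
        · rw [hd]; simp [hAS]
    · rw [dif_neg hguard]
      exact (go_terminal l dir hd0 hdir j (by omega) hinv).symm

-- A with retries disabled is the plain safety check
theorem S_eval (l : List Int) (damp deep : Bool) (hdd : damp = false ∨ deep = true) :
    is_level_safe l damp deep = altSafe l := by
  rw [is_level_safe]
  by_cases hl : l.length ≤ 1
  · rw [dif_pos hl, altSafe_short hl]
  · rw [dif_neg hl]
    rcases Classical.em (distOK (pdiff l 0)) with hfd | hfd
    · have hb : is_distance_safe (compute_distance (l.getD 0 0) (l.getD 1 0)) = true := by
        exact (dist_bool _ _).mpr hfd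
      rw [hb]
      simp only [Bool.not_true, Bool.false_eq_true, if_false]
      exact go_plain l damp deep _ hdd hfd rfl (by omega) 0 (fun k hk1 hk2 => by omega)
    · have hb : is_distance_safe (compute_distance (l.getD 0 0) (l.getD 1 0)) = false := by
        cases h : is_distance_safe (compute_distance (l.getD 0 0) (l.getD 1 0))
        · rfl
        · exact absurd ((dist_bool _ _).mp h) hfd
      rw [hb]
      have hAS : altSafe l = false := by
        cases hAS : altSafe l
        · rfl
        · exact absurd ((altSafe_eq_true_iff l).mp hAS 0 (by omega)).1 hfd
      rcases hdd with hd | hd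
      · rw [hd]; simp [hAS]
      · rw [hd]; simp [hAS]

-- the loop in dampener mode
theorem go_main (l : List Int) (dir : Int)
    (hd0 : distOK (pdiff l 0)) (hdir : dir = ldir l 0) (hlen : 2 ≤ l.length) :
    ∀ j, (∀ k, 1 ≤ k → k ≤ j → Good l dir k) →
      is_level_safe_go l true false dir j = is_level_safe_alt l true false := by
  suffices H : ∀ m j, l.length - (j+2) ≤ m → (∀ k, 1 ≤ k → k ≤ j → Good l dir k) →
      is_level_safe_go l true false dir j = is_level_safe_alt l true false from
    fun j hinv => H (l.length - (j+2)) j le_rfl hinv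
  intro m
  induction m with
  | zero =>
    intro j hle hinv
    rw [is_level_safe_go, dif_neg (by omega)]
    have := go_terminal l dir hd0 hdir j (by omega) hinv
    simp [is_level_safe_alt, this]
  | succ m ih =>
    intro j hle hinv
    rw [is_level_safe_go]
    by_cases hguard : j + 1 < l.length - 1
    · rw [dif_pos hguard]
      by_cases hgood : Good l dir (j+1)
      · rw [if_neg (by simp only [Bool.not_eq_true]; exact (cond_false_iff l dir (j+1)).mpr hgood)]
        exact ih (j+1) (by omega) (fun k hk1 hk2 => by
          rcases Nat.lt_or_ge k (j+1) with h | h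
          · exact hinv k hk1 (by omega)
          · have : k = j + 1 := by omega
            exact this ▸ hgood)
      · rw [if_pos (by
          cases hc : (decide (dir ≠ (if l.getD (j+1) 0 ≤ l.getD (j+1+1) 0 then (1:Int) else -1))
            || !(is_distance_safe (compute_distance (l.getD (j+1) 0) (l.getD (j+1+1) 0))))
          · exact absurd ((cond_false_iff l dir (j+1)).mp hc) hgood
          · rfl)]
        have hAS : altSafe l = false :=
          altSafe_false_of_bad l dir (j+1) hdir (by omega) hgood
        have hprev : ∀ k, 1 ≤ k → k < j + 1 → Good l dir k :=
          fun k hk1 hk2 => hinv k hk1 (by omega)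
        rw [S_eval _ _ _ (Or.inr rfl), S_eval _ _ _ (Or.inr rfl), S_eval _ _ _ (Or.inr rfl)]
        simp only [Bool.not_false, Bool.not_true, Bool.true_and, Bool.false_eq_true, if_false]
        rw [is_level_safe_alt, if_neg (by rw [hAS]; exact Bool.false_ne_true)]
        simp only [Bool.not_true, Bool.false_or, Bool.false_eq_true, if_false]
        rw [show j + 1 - 1 = j from rfl]
        rw [Bool.eq_iff_iff]
        simp only [Bool.or_eq_true, List.any_eq_true, List.mem_range]
        constructor
        · rintro ((h | h) | h)
          · exact ⟨j, by omega, h⟩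
          · exact ⟨j+1, by omega, h⟩
          · exact ⟨j+2, by omega, h⟩
        · rintro ⟨k, hk, hsafe⟩
          by_cases hfar : k + 2 ≤ j + 1 ∨ j + 3 ≤ k
          · exfalso
            have := rm_unsafe l dir (j+1) k hdir hd0 (by omega) (by omega) hprev hgood hk
              (by omega)
            rw [this] at hsafe
            exact Bool.false_ne_true hsafe
          · rcases Nat.lt_trichotomy k (j+1) with h | h | h
            · left; left
              have hkj : k = j := by omega
              subst hkj; exact hsafe
            · left; right
              subst h; exact hsafe
            · right
              have hkj : k = j + 2 := by omega
              subst hkj; exact hsafe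
    · rw [dif_neg hguard]
      have := go_terminal l dir hd0 hdir j (by omega) hinv
      simp [is_level_safe_alt, this]

-- ===== VERDICT (by name: the statement is the Claim_ definition above) =====
theorem is_level_safe_spec : Claim_equal_is_level_safe := by
  intro level damp deep _hdom
  unfold Spec_is_level_safe
  cases damp with
  | false =>
    rw [S_eval level false deep (Or.inl rfl), is_level_safe_alt]
    cases hAS : altSafe level <;> simp [hAS]
  | true =>
    cases deep with
    | true =>
      rw [S_eval _ _ _ (Or.inr rfl), is_level_safe_alt]
      cases hAS : altSafe level <;> simp [hAS]
    | false =>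
      -- the dampener case proper
      rw [is_level_safe]
      by_cases hl : level.length ≤ 1
      · rw [dif_pos hl, is_level_safe_alt, if_pos (altSafe_short hl)]
      · rw [dif_neg hl]
        rcases Classical.em (distOK (pdiff level 0)) with hfd | hfd
        · rw [(dist_bool _ _).mpr hfd]
          simp only [Bool.not_true, Bool.false_eq_true, if_false]
          exact go_main level _ hfd rfl (by omega) 0 (fun k hk1 hk2 => by omega)
        · have hb : is_distance_safe (compute_distance (level.getD 0 0) (level.getD 1 0)) = false := by
            cases h : is_distance_safe (compute_distance (level.getD 0 0) (level.getD 1 0))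
            · rfl
            · exact absurd ((dist_bool _ _).mp h) hfd
          rw [hb]
          simp only [Bool.not_true, Bool.not_false, Bool.or_false, Bool.true_eq_false,
            Bool.false_eq_true, if_false, if_true]
          rw [S_eval _ _ _ (Or.inr rfl), S_eval _ _ _ (Or.inr rfl)]
          have hAS : altSafe level = false := by
            cases hAS : altSafe level
            · rfl
            · exact absurd ((altSafe_eq_true_iff level).mp hAS 0 (by omega)).1 hfd
          rw [is_level_safe_alt, if_neg (by rw [hAS]; exact Bool.false_ne_true)]
          simp only [Bool.not_true, Bool.false_or, Bool.false_eq_true, if_false]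
          have e1 : [level.getD 0 0] ++ level.drop 2 = level.take 1 ++ level.drop (1+1) := by
            cases level with
            | nil => simp at hl
            | cons a t => simp [List.getD]
          rw [e1]
          rw [Bool.eq_iff_iff]
          simp only [Bool.or_eq_true, List.any_eq_true, List.mem_range]
          constructor
          · rintro (h | h)
            · exact ⟨1, by omega, h⟩
            · exact ⟨0, by omega, h⟩
          · rintro ⟨k, hk, hsafe⟩
            by_cases hk2 : 2 ≤ k
            · exfalso
              rw [rm_unsafe0 level k (by omega) hfd hk2] at hsafe
              exact Bool.false_ne_true hsafe
            · rcases Nat.lt_or_ge k 1 with h | h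
              · right
                have hk0 : k = 0 := by omega
                subst hk0; exact hsafe
              · left
                have hk1 : k = 1 := by omega
                subst hk1; exact hsafe
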